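-- pv_equiv track=rewrite | github.com/naveen-m-it/Coding-Problems | HackerEarth/monkAndNiceString.py | solve
-- ===== SOURCE A (Python) =====
-- def solve(s):
--     n=0
--     ans = []
--     for i in range(len(s)):
--         n=0
--         count = 0
--         while n<i:
--             if s[i]>s[n]:
--                 count+=1
--             n+=1
--         ans.append(count)
--     return ans
-- ===== SOURCE B (Python) =====
-- def solve(s):
--     # Running frequency table over the 128 ASCII codes: for each character,
--     # the answer is the number of earlier strictly-smaller characters, i.e.
--     # the prefix sum of the frequencies of all smaller codes.
--     freq = [0] * 128
--     ans = []
--     for ch in s: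
--         code = ord(ch)
--         ans.append(sum(freq[:code]))
--         freq[code] += 1
--     return ans
-- ===== Notes on version B (the rewrite author's own statement) =====
-- stated objective: faster
-- what changed: Replaces the quadratic per-position rescan of the prefix by a single pass that maintains a running frequency array over the 128 ASCII codes and emits, for each character, the sum of frequencies of strictly smaller codes.
import Mathlib
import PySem

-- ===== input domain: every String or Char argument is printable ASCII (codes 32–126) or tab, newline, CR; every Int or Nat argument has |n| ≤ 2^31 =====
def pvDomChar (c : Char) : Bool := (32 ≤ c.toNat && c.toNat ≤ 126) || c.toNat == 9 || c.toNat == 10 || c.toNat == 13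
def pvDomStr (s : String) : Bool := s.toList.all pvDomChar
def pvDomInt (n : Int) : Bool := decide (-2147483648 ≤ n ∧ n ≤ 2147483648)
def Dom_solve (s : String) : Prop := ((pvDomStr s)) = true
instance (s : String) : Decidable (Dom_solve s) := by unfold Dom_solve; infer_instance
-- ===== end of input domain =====

-- B replaces A's quadratic prefix rescan by one pass over a running 128-slot
-- ASCII frequency array (answer = sum of frequencies of smaller codes): faster.

-- ===== PORT A =====
-- the 'while n < i' loop of A; indices satisfy 0 ≤ n < i < len(s), so pyGetD is exact there
def solveWhile (cs : List Char) (i n count : Int) : Int :=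
  if _h : n < i then
    solveWhile cs i (n + 1)
      (if PySem.List.pyGetD cs i default > PySem.List.pyGetD cs n default then count + 1 else count)
  else count
termination_by (i - n).toNat
decreasing_by omega

def solve (s : String) : List Int :=
  let cs := s.toList
  (PySem.List.pyRange 0 (cs.length : Int) 1).foldl
    (fun ans i => ans ++ [solveWhile cs i 0 0]) []

-- ===== PORT B =====
-- one step of B's loop: read 'sum(freq[:code])', then 'freq[code] += 1'
-- (freq[:code] = take, freq[code] read/write = getD/set: exact for the 0 ≤ code < 128 reached on Dom)
def bStep (st : List Int × List Int) (ch : Char) : List Int × List Int :=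
  let code := ch.toNat
  (st.1.set code (st.1.getD code 0 + 1), st.2 ++ [(st.1.take code).sum])

def solve_alt (s : String) : List Int :=
  (s.toList.foldl bStep (List.replicate 128 0, [])).2

-- ===== PRECONDITION & SPEC =====
def Spec_solve (s : String) (out : List Int) : Prop := out = solve_alt s
instance (s : String) (out : List Int) : Decidable (Spec_solve s out) := by unfold Spec_solve; infer_instance

-- ===== CLAIM (what is proved, stated in full; the proofs are below) =====
def Claim_equal_solve : Prop := ∀ (s : String), Dom_solve s → Spec_solve s (solve s)

-- ===== LEMMAS AND PROOFS =====

-- number of occurrences of code c among pre (the running frequency array, as a function of the prefix)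
def freqOf (pre : List Char) : List Int :=
  (List.range 128).map (fun c => (pre.countP (fun x => x.toNat = c) : Int))

-- the intended answers: for each char of rest, # of strictly smaller chars in the prefix so far
def specList (pre rest : List Char) : List Int :=
  match rest with
  | [] => []
  | c :: rest => ((pre.countP (fun x => x.toNat < c.toNat) : Nat) : Int) :: specList (pre ++ [c]) rest

lemma char_lt_iff (x c : Char) : x < c ↔ x.toNat < c.toNat := by
  constructor
  · intro h; exact h
  · intro h; exact h

lemma freqOf_nil : freqOf [] = List.replicate 128 0 := by
  simp [freqOf]

lemma freqOf_length (pre : List Char) : (freqOf pre).length = 128 := by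
  simp [freqOf]

lemma freqOf_get (pre : List Char) (j : Nat) (hj : j < 128) :
    (freqOf pre)[j]'(by simp [freqOf_length, hj]) = (pre.countP (fun x => x.toNat = j) : Int) := by
  simp [freqOf]

lemma freqOf_snoc (pre : List Char) (c : Char) (hc : c.toNat < 128) :
    (freqOf pre).set c.toNat ((freqOf pre).getD c.toNat 0 + 1) = freqOf (pre ++ [c]) := by
  apply List.ext_getElem
  · simp [freqOf_length]
  · intro j h1 h2
    have hj : j < 128 := by simpa [freqOf_length] using h2
    have hgetD : (freqOf pre).getD c.toNat 0 = (pre.countP (fun x => x.toNat = c.toNat) : Int) := by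
      rw [List.getD_eq_getElem?_getD,
        List.getElem?_eq_getElem (by rw [freqOf_length]; exact hc)]
      simp [freqOf_get pre c.toNat hc]
    by_cases hje : c.toNat = j
    · subst hje
      rw [List.getElem_set, if_pos rfl, hgetD, freqOf_get (pre ++ [c]) _ hj]
      simp [List.countP_append]
    · rw [List.getElem_set, if_neg hje, freqOf_get (pre ++ [c]) j hj, freqOf_get pre j hj]
      simp [List.countP_append, hje]

lemma countP_lt_succ (pre : List Char) (m : Nat) :
    pre.countP (fun x => x.toNat < m + 1)
      = pre.countP (fun x => x.toNat < m) + pre.countP (fun x => x.toNat = m) := by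
  induction pre with
  | nil => simp
  | cons x pre ih =>
    simp only [List.countP_cons, ih]
    split_ifs with h1 h2 h3 <;> simp_all <;> omega

lemma sum_take_freqOf (pre : List Char) (m : Nat) (hm : m ≤ 128) :
    ((freqOf pre).take m).sum = (pre.countP (fun x => x.toNat < m) : Int) := by
  induction m with
  | zero => simp
  | succ m ih =>
    have hm' : m ≤ 128 := by omega
    have hlt : m < (freqOf pre).length := by rw [freqOf_length]; omega
    rw [List.take_add_one, List.sum_append, ih hm']
    rw [List.getElem?_eq_getElem hlt]
    simp only [Option.toList_some, List.sum_cons, List.sum_nil, add_zero]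
    rw [freqOf_get pre m (by omega), countP_lt_succ]
    push_cast; ring

-- the B-side loop invariant
lemma foldB (rest : List Char) : ∀ (pre : List Char) (acc : List Int),
    (∀ x ∈ rest, x.toNat < 128) →
    (rest.foldl bStep (freqOf pre, acc)).2 = acc ++ specList pre rest := by
  induction rest with
  | nil => intro pre acc _; simp [specList]
  | cons c rest ih =>
    intro pre acc hdom
    have hc : c.toNat < 128 := hdom c (by simp)
    have hstep : bStep (freqOf pre, acc) c
        = (freqOf (pre ++ [c]), acc ++ [(pre.countP (fun x => x.toNat < c.toNat) : Int)]) := by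
      simp only [bStep, freqOf_snoc pre c hc,
        sum_take_freqOf pre c.toNat (by omega)]
    rw [List.foldl_cons, hstep, ih (pre ++ [c]) _ (fun x hx => hdom x (by simp [hx]))]
    simp [specList]

-- B computes specList
lemma solve_alt_eq (s : String) (h : ∀ x ∈ s.toList, x.toNat < 128) :
    solve_alt s = specList [] s.toList := by
  have := foldB s.toList [] [] h
  simpa [solve_alt, freqOf_nil] using this

-- the A-side while loop counts smaller earlier chars
lemma solveWhile_eq (cs : List Char) (k : Nat) (hk : k < cs.length) :
    ∀ (d n : Nat) (count : Int), n + d = k →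
    solveWhile cs k n count
      = count + (((cs.drop n).take d).countP (fun x => x.toNat < (cs[k]'hk).toNat) : Int) := by
  intro d
  induction d with
  | zero =>
    intro n count hn
    have hnn : ¬ ((n : Int) < (k : Int)) := by omega
    rw [solveWhile]
    simp [hnn]
  | succ d ih =>
    intro n count hn
    have hnk : (n : Int) < (k : Int) := by omega
    have hnlen : n < cs.length := by omega
    rw [solveWhile]
    simp only [hnk, dif_pos]
    have h1 : ((n : Int) + 1) = ((n + 1 : Nat) : Int) := by push_cast; ring
    rw [h1, ih (n + 1) _ (by omega)]
    have hgi : PySem.List.pyGetD cs (k : Int) default = cs[k]'hk := by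
      simp [PySem.List.pyGetD_natCast, List.getD_eq_getElem?_getD, List.getElem?_eq_getElem hk]
    have hgn : PySem.List.pyGetD cs (n : Int) default = cs[n]'hnlen := by
      simp [PySem.List.pyGetD_natCast, List.getD_eq_getElem?_getD, List.getElem?_eq_getElem hnlen]
    rw [hgi, hgn]
    have hdrop : cs.drop n = cs[n]'hnlen :: cs.drop (n + 1) := List.drop_eq_getElem_cons hnlen
    rw [hdrop]
    simp only [List.take_succ_cons, List.countP_cons]
    have : ((cs[n]'hnlen) < (cs[k]'hk)) ↔ ((cs[n]'hnlen).toNat < (cs[k]'hk).toNat) := char_lt_iff _ _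
    by_cases hlt : (cs[n]'hnlen).toNat < (cs[k]'hk).toNat
    · simp only [gt_iff_lt]
      rw [if_pos (this.mpr hlt)]
      simp [hlt]; ring
    · simp only [gt_iff_lt]
      rw [if_neg (fun hh => hlt (this.mp hh))]
      simp [hlt]

-- specList as a map over indices
lemma specList_eq_map (rest : List Char) : ∀ (pre : List Char),
    specList pre rest = (List.range rest.length).map
      (fun j => ((pre ++ rest.take j).countP (fun x => x.toNat < (rest.getD j default).toNat) : Int)) := by
  induction rest with
  | nil => intro pre; simp [specList]
  | cons c rest ih =>
    intro pre
    simp only [specList, ih (pre ++ [c]), List.length_cons, List.range_succ_eq_map,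
      List.map_cons, List.map_map]
    refine congrArg₂ List.cons ?_ ?_
    · simp
    · apply List.map_congr_left
      intro j hj
      simp only [List.take_succ_cons, List.getD_cons_succ, List.countP_append,
        List.append_assoc, Function.comp_def]
      rw [List.countP_cons, List.countP_cons, List.countP_nil]
      push_cast
      ring

lemma solve_eq (s : String) :
    solve s = (List.range s.toList.length).map
      (fun j => ((s.toList.take j).countP (fun x => x.toNat < (s.toList.getD j default).toNat) : Int)) := by
  simp only [solve]
  rw [PySem.List.foldl_append_singleton_eq_map, PySem.List.pyRange_zero_natCast, List.map_map]
  simp only [List.nil_append, Function.comp_def]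
  apply List.map_congr_left
  intro k hk
  have hk' : k < s.toList.length := List.mem_range.mp hk
  have h := solveWhile_eq s.toList k hk' k 0 0 (by omega)
  simp only [Nat.cast_zero] at h
  rw [h]
  rw [List.getD_eq_getElem?_getD, List.getElem?_eq_getElem hk']
  simp only [List.drop_zero, zero_add, Option.getD_some]
  rfl

theorem solve_spec : Claim_equal_solve := by
  intro s hdom
  unfold Spec_solve
  have hchars : ∀ x ∈ s.toList, x.toNat < 128 := by
    intro x hx
    have := List.all_eq_true.mp hdom x hx
    simp [pvDomChar] at this
    omega
  rw [solve_eq s, solve_alt_eq s hchars, specList_eq_map]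
  simp
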